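-- pv_equiv track=rewrite | github.com/lal4lal/TUBES-TBA | token_recognizer.py | check_keterangan
-- ===== SOURCE A (Python) =====
-- def check_keterangan(input_string):
--     state = keterangan_initial_states
--     for char in input_string:
--         if (state, char) in keterangan_transitions:
--             state = keterangan_transitions[(state, char)]
--         else:
--             return False
--     return state in keterangan_accept_states
--
-- keterangan_transitions = {
--     # k, e, m, a, r, i, n, s, g, b, o, t, l, u
--     ('q0', 'k'): 'q1', ('q1', 'e'): 'q2', ('q2', 'm'): 'q3', ('q3', 'a'): 'q4', ('q4', 'r'): 'q5', ('q5', 'i'): 'q6', ('q6', 'n'): 'q7',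
--     ('q0', 's'): 'q8', ('q8', 'e'): 'q9', ('q9', 'k'): 'q10', ('q10', 'a'): 'q11', ('q11', 'r'): 'q12', ('q12', 'a'): 'q13', ('q13', 'n'): 'q14', ('q14', 'g'): 'q15',
--     ('q0', 'b'): 'q16', ('q16', 'e'): 'q17', ('q17', 's'): 'q18', ('q18', 'o'): 'q19', ('q19', 'k'): 'q20',
--     ('q0', 'n'): 'q21', ('q21', 'a'): 'q22', ('q22', 'n'): 'q23', ('q23', 't'): 'q24', ('q24', 'i'): 'q25',
--     ('q0', 'l'): 'q26', ('q26', 'u'): 'q27', ('q27', 's'): 'q28', ('q28', 'a'): 'q29'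
-- }
--
-- keterangan_accept_states = {'q7', 'q15', 'q20', 'q25', 'q29'}
--
-- keterangan_initial_states = 'q0'
-- ===== SOURCE B (Python) =====
-- _KETERANGAN_WORDS = frozenset({"kemarin", "sekarang", "besok", "nanti", "lusa"})
--
-- def check_keterangan(input_string):
--     return input_string in _KETERANGAN_WORDS
-- ===== Notes on version B (the rewrite author's own statement) =====
-- stated objective: simpler
-- what changed: Replaced the character-by-character DFA walk over an explicit transition table with a single membership test of the whole input in the five-word set the DFA accepts.
import Mathlib
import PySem

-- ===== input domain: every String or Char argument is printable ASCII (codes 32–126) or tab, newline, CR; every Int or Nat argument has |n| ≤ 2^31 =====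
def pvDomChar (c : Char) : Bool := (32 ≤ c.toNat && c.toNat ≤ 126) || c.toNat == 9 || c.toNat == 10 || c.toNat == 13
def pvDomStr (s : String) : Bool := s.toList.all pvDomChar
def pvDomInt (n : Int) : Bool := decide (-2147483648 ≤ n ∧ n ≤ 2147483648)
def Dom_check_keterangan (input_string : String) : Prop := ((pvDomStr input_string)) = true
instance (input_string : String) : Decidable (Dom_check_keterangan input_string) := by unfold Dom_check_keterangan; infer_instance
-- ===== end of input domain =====

-- B replaces A's DFA walk over a transition table by a single membership test in the
-- five-word set the DFA accepts (objective: simpler).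

-- ===== PORT A =====
-- A's transition dict, in source order
def ketTrans : PySem.Dict (String × Char) String := PySem.Dict.mk [
  (("q0", 'k'), "q1"),
  (("q1", 'e'), "q2"),
  (("q2", 'm'), "q3"),
  (("q3", 'a'), "q4"),
  (("q4", 'r'), "q5"),
  (("q5", 'i'), "q6"),
  (("q6", 'n'), "q7"),
  (("q0", 's'), "q8"),
  (("q8", 'e'), "q9"),
  (("q9", 'k'), "q10"),
  (("q10", 'a'), "q11"),
  (("q11", 'r'), "q12"),
  (("q12", 'a'), "q13"),
  (("q13", 'n'), "q14"),
  (("q14", 'g'), "q15"),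
  (("q0", 'b'), "q16"),
  (("q16", 'e'), "q17"),
  (("q17", 's'), "q18"),
  (("q18", 'o'), "q19"),
  (("q19", 'k'), "q20"),
  (("q0", 'n'), "q21"),
  (("q21", 'a'), "q22"),
  (("q22", 'n'), "q23"),
  (("q23", 't'), "q24"),
  (("q24", 'i'), "q25"),
  (("q0", 'l'), "q26"),
  (("q26", 'u'), "q27"),
  (("q27", 's'), "q28"),
  (("q28", 'a'), "q29")]

-- A's accept-state set
def ketAccept : PySem.Set String := PySem.Set.ofList ["q7", "q15", "q20", "q25", "q29"]

-- A's for-loop: step through ketTrans, early-return False on a missing transition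
def ketLoop (state : String) (cs : List Char) : Bool :=
  match cs with
  | [] => PySem.Set.contains ketAccept state
  | c :: rest =>
    match PySem.Dict.get? ketTrans (state, c) with
    | some s' => ketLoop s' rest
    | none => false

def check_keterangan (input_string : String) : Bool :=
  ketLoop "q0" input_string.toList

-- ===== PORT B =====
def ketWords : List String := ["kemarin", "sekarang", "besok", "nanti", "lusa"]

def check_keterangan_alt (input_string : String) : Bool :=
  ketWords.contains input_string

-- ===== PRECONDITION & SPEC =====
def Spec_check_keterangan (input_string : String) (out : Bool) : Prop := out = check_keterangan_alt input_string
instance (input_string : String) (out : Bool) : Decidable (Spec_check_keterangan input_string out) := by unfold Spec_check_keterangan; infer_instance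

-- ===== CLAIM (what is proved, stated in full; the proofs are below) =====
def Claim_equal_check_keterangan : Prop := ∀ (input_string : String), Dom_check_keterangan input_string → Spec_check_keterangan input_string (check_keterangan input_string)

-- ===== LEMMAS AND PROOFS =====
-- lookup in the empty literal dict fails (base case of get?_mk_cons chains)
lemma get?_mk_nil {κ ν : Type} [BEq κ] (x : κ) :
    (PySem.Dict.mk ([] : List (κ × ν))).get? x = none := by
  simp [PySem.Dict.get?]

-- one lemma per DFA state: from state qN the loop accepts exactly the residual suffix of its word

lemma ketLoop_q7 (cs : List Char) : ketLoop "q7" cs = decide (cs = []) := by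
  cases cs with
  | nil => rfl
  | cons c cs => simp [ketLoop, ketTrans, PySem.Dict.get?_mk_cons, get?_mk_nil]

lemma ketLoop_q6 (cs : List Char) : ketLoop "q6" cs = decide (cs = ['n']) := by
  cases cs with
  | nil => rfl
  | cons c cs =>
    by_cases h : c = 'n'
    · subst h; simp [ketLoop, ketTrans, PySem.Dict.get?_mk_cons, ketLoop_q7]
    · simp [ketLoop, ketTrans, PySem.Dict.get?_mk_cons, get?_mk_nil, h, Ne.symm h]

lemma ketLoop_q5 (cs : List Char) : ketLoop "q5" cs = decide (cs = ['i', 'n']) := by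
  cases cs with
  | nil => rfl
  | cons c cs =>
    by_cases h : c = 'i'
    · subst h; simp [ketLoop, ketTrans, PySem.Dict.get?_mk_cons, ketLoop_q6]
    · simp [ketLoop, ketTrans, PySem.Dict.get?_mk_cons, get?_mk_nil, h, Ne.symm h]

lemma ketLoop_q4 (cs : List Char) : ketLoop "q4" cs = decide (cs = ['r', 'i', 'n']) := by
  cases cs with
  | nil => rfl
  | cons c cs =>
    by_cases h : c = 'r'
    · subst h; simp [ketLoop, ketTrans, PySem.Dict.get?_mk_cons, ketLoop_q5]
    · simp [ketLoop, ketTrans, PySem.Dict.get?_mk_cons, get?_mk_nil, h, Ne.symm h]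

lemma ketLoop_q3 (cs : List Char) : ketLoop "q3" cs = decide (cs = ['a', 'r', 'i', 'n']) := by
  cases cs with
  | nil => rfl
  | cons c cs =>
    by_cases h : c = 'a'
    · subst h; simp [ketLoop, ketTrans, PySem.Dict.get?_mk_cons, ketLoop_q4]
    · simp [ketLoop, ketTrans, PySem.Dict.get?_mk_cons, get?_mk_nil, h, Ne.symm h]

lemma ketLoop_q2 (cs : List Char) : ketLoop "q2" cs = decide (cs = ['m', 'a', 'r', 'i', 'n']) := by
  cases cs with
  | nil => rfl
  | cons c cs =>
    by_cases h : c = 'm'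
    · subst h; simp [ketLoop, ketTrans, PySem.Dict.get?_mk_cons, ketLoop_q3]
    · simp [ketLoop, ketTrans, PySem.Dict.get?_mk_cons, get?_mk_nil, h, Ne.symm h]

lemma ketLoop_q1 (cs : List Char) : ketLoop "q1" cs = decide (cs = ['e', 'm', 'a', 'r', 'i', 'n']) := by
  cases cs with
  | nil => rfl
  | cons c cs =>
    by_cases h : c = 'e'
    · subst h; simp [ketLoop, ketTrans, PySem.Dict.get?_mk_cons, ketLoop_q2]
    · simp [ketLoop, ketTrans, PySem.Dict.get?_mk_cons, get?_mk_nil, h, Ne.symm h]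

lemma ketLoop_q15 (cs : List Char) : ketLoop "q15" cs = decide (cs = []) := by
  cases cs with
  | nil => rfl
  | cons c cs => simp [ketLoop, ketTrans, PySem.Dict.get?_mk_cons, get?_mk_nil]

lemma ketLoop_q14 (cs : List Char) : ketLoop "q14" cs = decide (cs = ['g']) := by
  cases cs with
  | nil => rfl
  | cons c cs =>
    by_cases h : c = 'g'
    · subst h; simp [ketLoop, ketTrans, PySem.Dict.get?_mk_cons, ketLoop_q15]
    · simp [ketLoop, ketTrans, PySem.Dict.get?_mk_cons, get?_mk_nil, h, Ne.symm h]

lemma ketLoop_q13 (cs : List Char) : ketLoop "q13" cs = decide (cs = ['n', 'g']) := by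
  cases cs with
  | nil => rfl
  | cons c cs =>
    by_cases h : c = 'n'
    · subst h; simp [ketLoop, ketTrans, PySem.Dict.get?_mk_cons, ketLoop_q14]
    · simp [ketLoop, ketTrans, PySem.Dict.get?_mk_cons, get?_mk_nil, h, Ne.symm h]

lemma ketLoop_q12 (cs : List Char) : ketLoop "q12" cs = decide (cs = ['a', 'n', 'g']) := by
  cases cs with
  | nil => rfl
  | cons c cs =>
    by_cases h : c = 'a'
    · subst h; simp [ketLoop, ketTrans, PySem.Dict.get?_mk_cons, ketLoop_q13]
    · simp [ketLoop, ketTrans, PySem.Dict.get?_mk_cons, get?_mk_nil, h, Ne.symm h]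

lemma ketLoop_q11 (cs : List Char) : ketLoop "q11" cs = decide (cs = ['r', 'a', 'n', 'g']) := by
  cases cs with
  | nil => rfl
  | cons c cs =>
    by_cases h : c = 'r'
    · subst h; simp [ketLoop, ketTrans, PySem.Dict.get?_mk_cons, ketLoop_q12]
    · simp [ketLoop, ketTrans, PySem.Dict.get?_mk_cons, get?_mk_nil, h, Ne.symm h]

lemma ketLoop_q10 (cs : List Char) : ketLoop "q10" cs = decide (cs = ['a', 'r', 'a', 'n', 'g']) := by
  cases cs with
  | nil => rfl
  | cons c cs =>
    by_cases h : c = 'a'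
    · subst h; simp [ketLoop, ketTrans, PySem.Dict.get?_mk_cons, ketLoop_q11]
    · simp [ketLoop, ketTrans, PySem.Dict.get?_mk_cons, get?_mk_nil, h, Ne.symm h]

lemma ketLoop_q9 (cs : List Char) : ketLoop "q9" cs = decide (cs = ['k', 'a', 'r', 'a', 'n', 'g']) := by
  cases cs with
  | nil => rfl
  | cons c cs =>
    by_cases h : c = 'k'
    · subst h; simp [ketLoop, ketTrans, PySem.Dict.get?_mk_cons, ketLoop_q10]
    · simp [ketLoop, ketTrans, PySem.Dict.get?_mk_cons, get?_mk_nil, h, Ne.symm h]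

lemma ketLoop_q8 (cs : List Char) : ketLoop "q8" cs = decide (cs = ['e', 'k', 'a', 'r', 'a', 'n', 'g']) := by
  cases cs with
  | nil => rfl
  | cons c cs =>
    by_cases h : c = 'e'
    · subst h; simp [ketLoop, ketTrans, PySem.Dict.get?_mk_cons, ketLoop_q9]
    · simp [ketLoop, ketTrans, PySem.Dict.get?_mk_cons, get?_mk_nil, h, Ne.symm h]

lemma ketLoop_q20 (cs : List Char) : ketLoop "q20" cs = decide (cs = []) := by
  cases cs with
  | nil => rfl
  | cons c cs => simp [ketLoop, ketTrans, PySem.Dict.get?_mk_cons, get?_mk_nil]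

lemma ketLoop_q19 (cs : List Char) : ketLoop "q19" cs = decide (cs = ['k']) := by
  cases cs with
  | nil => rfl
  | cons c cs =>
    by_cases h : c = 'k'
    · subst h; simp [ketLoop, ketTrans, PySem.Dict.get?_mk_cons, ketLoop_q20]
    · simp [ketLoop, ketTrans, PySem.Dict.get?_mk_cons, get?_mk_nil, h, Ne.symm h]

lemma ketLoop_q18 (cs : List Char) : ketLoop "q18" cs = decide (cs = ['o', 'k']) := by
  cases cs with
  | nil => rfl
  | cons c cs =>
    by_cases h : c = 'o'
    · subst h; simp [ketLoop, ketTrans, PySem.Dict.get?_mk_cons, ketLoop_q19]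
    · simp [ketLoop, ketTrans, PySem.Dict.get?_mk_cons, get?_mk_nil, h, Ne.symm h]

lemma ketLoop_q17 (cs : List Char) : ketLoop "q17" cs = decide (cs = ['s', 'o', 'k']) := by
  cases cs with
  | nil => rfl
  | cons c cs =>
    by_cases h : c = 's'
    · subst h; simp [ketLoop, ketTrans, PySem.Dict.get?_mk_cons, ketLoop_q18]
    · simp [ketLoop, ketTrans, PySem.Dict.get?_mk_cons, get?_mk_nil, h, Ne.symm h]

lemma ketLoop_q16 (cs : List Char) : ketLoop "q16" cs = decide (cs = ['e', 's', 'o', 'k']) := by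
  cases cs with
  | nil => rfl
  | cons c cs =>
    by_cases h : c = 'e'
    · subst h; simp [ketLoop, ketTrans, PySem.Dict.get?_mk_cons, ketLoop_q17]
    · simp [ketLoop, ketTrans, PySem.Dict.get?_mk_cons, get?_mk_nil, h, Ne.symm h]

lemma ketLoop_q25 (cs : List Char) : ketLoop "q25" cs = decide (cs = []) := by
  cases cs with
  | nil => rfl
  | cons c cs => simp [ketLoop, ketTrans, PySem.Dict.get?_mk_cons, get?_mk_nil]

lemma ketLoop_q24 (cs : List Char) : ketLoop "q24" cs = decide (cs = ['i']) := by
  cases cs with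
  | nil => rfl
  | cons c cs =>
    by_cases h : c = 'i'
    · subst h; simp [ketLoop, ketTrans, PySem.Dict.get?_mk_cons, ketLoop_q25]
    · simp [ketLoop, ketTrans, PySem.Dict.get?_mk_cons, get?_mk_nil, h, Ne.symm h]

lemma ketLoop_q23 (cs : List Char) : ketLoop "q23" cs = decide (cs = ['t', 'i']) := by
  cases cs with
  | nil => rfl
  | cons c cs =>
    by_cases h : c = 't'
    · subst h; simp [ketLoop, ketTrans, PySem.Dict.get?_mk_cons, ketLoop_q24]
    · simp [ketLoop, ketTrans, PySem.Dict.get?_mk_cons, get?_mk_nil, h, Ne.symm h]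

lemma ketLoop_q22 (cs : List Char) : ketLoop "q22" cs = decide (cs = ['n', 't', 'i']) := by
  cases cs with
  | nil => rfl
  | cons c cs =>
    by_cases h : c = 'n'
    · subst h; simp [ketLoop, ketTrans, PySem.Dict.get?_mk_cons, ketLoop_q23]
    · simp [ketLoop, ketTrans, PySem.Dict.get?_mk_cons, get?_mk_nil, h, Ne.symm h]

lemma ketLoop_q21 (cs : List Char) : ketLoop "q21" cs = decide (cs = ['a', 'n', 't', 'i']) := by
  cases cs with
  | nil => rfl
  | cons c cs =>
    by_cases h : c = 'a'
    · subst h; simp [ketLoop, ketTrans, PySem.Dict.get?_mk_cons, ketLoop_q22]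
    · simp [ketLoop, ketTrans, PySem.Dict.get?_mk_cons, get?_mk_nil, h, Ne.symm h]

lemma ketLoop_q29 (cs : List Char) : ketLoop "q29" cs = decide (cs = []) := by
  cases cs with
  | nil => rfl
  | cons c cs => simp [ketLoop, ketTrans, PySem.Dict.get?_mk_cons, get?_mk_nil]

lemma ketLoop_q28 (cs : List Char) : ketLoop "q28" cs = decide (cs = ['a']) := by
  cases cs with
  | nil => rfl
  | cons c cs =>
    by_cases h : c = 'a'
    · subst h; simp [ketLoop, ketTrans, PySem.Dict.get?_mk_cons, ketLoop_q29]
    · simp [ketLoop, ketTrans, PySem.Dict.get?_mk_cons, get?_mk_nil, h, Ne.symm h]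

lemma ketLoop_q27 (cs : List Char) : ketLoop "q27" cs = decide (cs = ['s', 'a']) := by
  cases cs with
  | nil => rfl
  | cons c cs =>
    by_cases h : c = 's'
    · subst h; simp [ketLoop, ketTrans, PySem.Dict.get?_mk_cons, ketLoop_q28]
    · simp [ketLoop, ketTrans, PySem.Dict.get?_mk_cons, get?_mk_nil, h, Ne.symm h]

lemma ketLoop_q26 (cs : List Char) : ketLoop "q26" cs = decide (cs = ['u', 's', 'a']) := by
  cases cs with
  | nil => rfl
  | cons c cs =>
    by_cases h : c = 'u'
    · subst h; simp [ketLoop, ketTrans, PySem.Dict.get?_mk_cons, ketLoop_q27]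
    · simp [ketLoop, ketTrans, PySem.Dict.get?_mk_cons, get?_mk_nil, h, Ne.symm h]

lemma ketLoop_q0 (cs : List Char) :
    ketLoop "q0" cs = decide (cs = ['k', 'e', 'm', 'a', 'r', 'i', 'n'] ∨ cs = ['s', 'e', 'k', 'a', 'r', 'a', 'n', 'g'] ∨ cs = ['b', 'e', 's', 'o', 'k'] ∨ cs = ['n', 'a', 'n', 't', 'i'] ∨ cs = ['l', 'u', 's', 'a']) := by
  cases cs with
  | nil => rfl
  | cons c cs =>
    by_cases h0 : c = 'k'
    · subst h0; simp [ketLoop, ketTrans, PySem.Dict.get?_mk_cons, ketLoop_q1]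
    by_cases h1 : c = 's'
    · subst h1; simp [ketLoop, ketTrans, PySem.Dict.get?_mk_cons, ketLoop_q8]
    by_cases h2 : c = 'b'
    · subst h2; simp [ketLoop, ketTrans, PySem.Dict.get?_mk_cons, ketLoop_q16]
    by_cases h3 : c = 'n'
    · subst h3; simp [ketLoop, ketTrans, PySem.Dict.get?_mk_cons, ketLoop_q21]
    by_cases h4 : c = 'l'
    · subst h4; simp [ketLoop, ketTrans, PySem.Dict.get?_mk_cons, ketLoop_q26]
    · simp [ketLoop, ketTrans, PySem.Dict.get?_mk_cons, get?_mk_nil, h0, Ne.symm h0, h1, Ne.symm h1, h2, Ne.symm h2, h3, Ne.symm h3, h4, Ne.symm h4]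

-- ===== VERDICT (by name: the statement is the Claim_ definition above) =====
theorem check_keterangan_spec : Claim_equal_check_keterangan := by
  intro s _
  show check_keterangan s = check_keterangan_alt s
  simp [check_keterangan, check_keterangan_alt, ketWords, ketLoop_q0,
    String.ext_iff]
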